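-- pv_equiv track=rewrite | github.com/chodakk/ProgrammersAlgorithm | etc/bruteforce_min.py | solution
-- ===== SOURCE A (Python) =====
-- def solution(sizes):
--     list1 = []
--     list2 = []
--     for s in sizes :
--         w = s[0]
--         h = s[1]
--         if(w>h) :
--             list1.append(w)
--             list2.append(h)
--         else :
--             list1.append(h)
--             list2.append(w)
--
--     return max(list1)*max(list2)
-- ===== SOURCE B (Python) =====
-- def solution(sizes):
--     if not sizes:
--         raise ValueError("max() arg is an empty sequence")
--
--     def best(part):
--         # returns (max larger-dim, max smaller-dim) of part, by divide and conquer
--         if len(part) == 1: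
--             w, h = part[0]
--             return (w, h) if w >= h else (h, w)
--         mid = len(part) // 2
--         a1, b1 = best(part[:mid])
--         a2, b2 = best(part[mid:])
--         return (max(a1, a2), max(b1, b2))
--
--     a, b = best(sizes)
--     return a * b
-- ===== Notes on version B (the rewrite author's own statement) =====
-- stated objective: alternative
-- what changed: Replaces A's iterative construction of two lists followed by two max() scans with a divide-and-conquer recursion that splits the list in halves and combines each half's (max larger-dim, max smaller-dim) pair componentwise.
-- outside the precondition, e.g. on solution([]): A raises ValueError, B raises ValueError
import Mathlib
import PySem

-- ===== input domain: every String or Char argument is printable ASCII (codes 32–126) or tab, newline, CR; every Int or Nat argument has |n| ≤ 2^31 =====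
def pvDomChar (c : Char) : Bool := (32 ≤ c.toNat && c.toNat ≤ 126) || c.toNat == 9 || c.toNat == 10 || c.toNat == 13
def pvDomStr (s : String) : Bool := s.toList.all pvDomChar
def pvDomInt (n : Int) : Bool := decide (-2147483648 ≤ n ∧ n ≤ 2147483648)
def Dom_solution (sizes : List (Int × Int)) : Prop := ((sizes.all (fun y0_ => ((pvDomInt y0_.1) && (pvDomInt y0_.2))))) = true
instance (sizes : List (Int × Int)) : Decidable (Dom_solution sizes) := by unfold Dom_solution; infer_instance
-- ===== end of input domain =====

-- B replaces A's two appended lists plus two max() scans by a divide-and-conquer recursion combining half-results; equal return values proved on nonempty input (A raises on []).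


-- ===== PORT A =====
-- A builds list1 (larger dims) and list2 (smaller dims) by appending, then multiplies their maxima.
def solution (sizes : List (Int × Int)) : Int :=
  let p := sizes.foldl
    (fun (p : List Int × List Int) s =>
      if s.1 > s.2 then (p.1 ++ [s.1], p.2 ++ [s.2]) else (p.1 ++ [s.2], p.2 ++ [s.1]))
    ([], [])
  ((PySem.List.max? p.1 (fun x => x)).getD 0) * ((PySem.List.max? p.2 (fun x => x)).getD 0)

-- ===== PORT B =====
-- Source B's helper best(part): divide and conquer on the list, combining (max hi, max lo) of the halves.
def solBest (part : List (Int × Int)) : Int × Int :=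
  match hpart : part with
  | [] => (0, 0)  -- never reached: Source B only calls best on nonempty parts
  | [(w, h)] => if w ≥ h then (w, h) else (h, w)
  | _ :: _ :: _ =>
      let mid := part.length / 2
      let p1 := solBest (part.take mid)
      let p2 := solBest (part.drop mid)
      (max p1.1 p2.1, max p1.2 p2.2)
termination_by part.length
decreasing_by
  · simp [hpart]; omega
  · simp [hpart]; omega

def solution_alt (sizes : List (Int × Int)) : Int :=
  match sizes with
  | [] => 0  -- Source B raises ValueError here; outside Pre_solution
  | _ =>
      let p := solBest sizes
      p.1 * p.2

-- ===== PRECONDITION & SPEC =====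
-- A's max([]) raises ValueError on the empty list (and B raises there too), so the empty input is excluded.
def Pre_solution (sizes : List (Int × Int)) : Prop := sizes ≠ []
instance (sizes : List (Int × Int)) : Decidable (Pre_solution sizes) := by unfold Pre_solution; infer_instance
def pvWitness_solution : (List (Int × Int)) := [(3, 5), (7, 2)]

def Spec_solution (sizes : List (Int × Int)) (out : Int) : Prop := out = solution_alt sizes
instance (sizes : List (Int × Int)) (out : Int) : Decidable (Spec_solution sizes out) := by unfold Spec_solution; infer_instance

-- ===== CLAIM (what is proved, stated in full; the proofs are below) =====
def Claim_equal_solution : Prop := ∀ (sizes : List (Int × Int)), Dom_solution sizes → Pre_solution sizes → Spec_solution sizes (solution sizes)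

-- ===== LEMMAS AND PROOFS =====
def pvHi (s : Int × Int) : Int := if s.1 > s.2 then s.1 else s.2
def pvLo (s : Int × Int) : Int := if s.1 > s.2 then s.2 else s.1

-- max of a nonempty Int list, A-style (running max from the head)
def pvM (l : List Int) : Int :=
  match l with
  | [] => 0
  | x :: t => t.foldl max x

theorem solution_foldl_eq (sizes : List (Int × Int)) (l1 l2 : List Int) :
    sizes.foldl
      (fun (p : List Int × List Int) s =>
        if s.1 > s.2 then (p.1 ++ [s.1], p.2 ++ [s.2]) else (p.1 ++ [s.2], p.2 ++ [s.1]))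
      (l1, l2) = (l1 ++ sizes.map pvHi, l2 ++ sizes.map pvLo) := by
  induction sizes generalizing l1 l2 with
  | nil => simp
  | cons s t ih =>
      simp only [List.foldl_cons, List.map_cons]
      by_cases h : s.1 > s.2
      · simp [h, ih, pvHi, pvLo]
      · simp [h, ih, pvHi, pvLo]

theorem foldl_max_init (s : List Int) (c y : Int) :
    s.foldl max (max c y) = max c (s.foldl max y) := by
  induction s generalizing y with
  | nil => simp
  | cons a t ih => simp only [List.foldl_cons, max_assoc, ih]

theorem pvM_append (a b : List Int) (ha : a ≠ []) (hb : b ≠ []) :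
    pvM (a ++ b) = max (pvM a) (pvM b) := by
  match a, b with
  | x :: t, y :: s =>
      simp only [pvM, List.cons_append, List.foldl_append, List.foldl_cons]
      exact foldl_max_init s (List.foldl max x t) y

theorem solBest_eq (part : List (Int × Int)) (hne : part ≠ []) :
    solBest part = (pvM (part.map pvHi), pvM (part.map pvLo)) := by
  match part with
  | [(w, h)] =>
      simp only [solBest, pvM, List.map_cons, List.map_nil, List.foldl_nil, pvHi, pvLo]
      by_cases hwh : w > h
      · simp [hwh, le_of_lt hwh]
      · simp only [hwh, if_false]
        have : w ≥ h ∨ ¬ w ≥ h := em _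
        rcases this with hge | hge
        · have : w = h := by omega
          simp [this]
        · simp [hge]
  | a :: b :: t =>
      rw [solBest]
      have hlen : (a :: b :: t).length ≥ 2 := by simp
      set l := a :: b :: t with hl
      have hmid1 : 1 ≤ l.length / 2 := by omega
      have hmid2 : l.length / 2 < l.length := by omega
      have htne : l.take (l.length / 2) ≠ [] := by
        intro h; have := congrArg List.length h; simp at this; omega
      have hdne : l.drop (l.length / 2) ≠ [] := by
        intro h; have := congrArg List.length h; simp at this; omega
      have ih1 := solBest_eq (l.take (l.length / 2)) htne
      have ih2 := solBest_eq (l.drop (l.length / 2)) hdne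
      simp only [ih1, ih2]
      have hsplit : l.map pvHi = (l.take (l.length / 2)).map pvHi ++ (l.drop (l.length / 2)).map pvHi := by
        rw [← List.map_append, List.take_append_drop]
      have hsplit2 : l.map pvLo = (l.take (l.length / 2)).map pvLo ++ (l.drop (l.length / 2)).map pvLo := by
        rw [← List.map_append, List.take_append_drop]
      have hm1 : (l.take (l.length / 2)).map pvHi ≠ [] := by simpa using htne
      have hm2 : (l.drop (l.length / 2)).map pvHi ≠ [] := by simpa using hdne
      have hm3 : (l.take (l.length / 2)).map pvLo ≠ [] := by simpa using htne
      have hm4 : (l.drop (l.length / 2)).map pvLo ≠ [] := by simpa using hdne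
      rw [hsplit, hsplit2, pvM_append _ _ hm1 hm2, pvM_append _ _ hm3 hm4]
termination_by part.length
decreasing_by
  · simp; omega
  · simp; omega

-- ===== VERDICT (by name: the statement is the Claim_ definition above) =====
theorem solution_spec : Claim_equal_solution := by
  intro sizes _ hpre
  unfold Spec_solution
  match sizes with
  | [] => exact absurd rfl hpre
  | (w, h) :: rest =>
      have hb := solBest_eq ((w, h) :: rest) (by simp)
      simp only [solution, solution_alt, solution_foldl_eq, List.nil_append, hb]
      simp only [List.map_cons, pvM, PySem.List.max?_id_cons, Option.getD_some]
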